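-- pv_equiv track=rewrite | github.com/gustavobastian/exercises-DASSOPG | class-1/Ejercicios_extras/6/6_3.py | insert_char
-- ===== SOURCE A (Python) =====
-- def insert_char(string, char, max):
--     s=""
--     count=0
--     for i in range (0, len(string)):
--         if (count<max):
--             s+=string[i]+str(char)
--             count+=1
--         else :
--             s+=string[i]
--
--     return s
-- ===== SOURCE B (Python) =====
-- def insert_char(string, char, max):
--     # split-point formulation: the first k characters get str(char) appended,
--     # the remaining suffix is concatenated untouched (no per-character counter).
--     n = len(string)
--     k = 0 if max < 0 else (n if max > n else max)
--     return "".join(c + str(char) for c in string[:k]) + string[k:]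
-- ===== Notes on version B (the rewrite author's own statement) =====
-- stated objective: alternative
-- what changed: Replaces the per-character counter-and-branch loop by computing a clamped split point k, joining char after each character of the k-prefix and concatenating the untouched suffix.
import Mathlib
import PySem

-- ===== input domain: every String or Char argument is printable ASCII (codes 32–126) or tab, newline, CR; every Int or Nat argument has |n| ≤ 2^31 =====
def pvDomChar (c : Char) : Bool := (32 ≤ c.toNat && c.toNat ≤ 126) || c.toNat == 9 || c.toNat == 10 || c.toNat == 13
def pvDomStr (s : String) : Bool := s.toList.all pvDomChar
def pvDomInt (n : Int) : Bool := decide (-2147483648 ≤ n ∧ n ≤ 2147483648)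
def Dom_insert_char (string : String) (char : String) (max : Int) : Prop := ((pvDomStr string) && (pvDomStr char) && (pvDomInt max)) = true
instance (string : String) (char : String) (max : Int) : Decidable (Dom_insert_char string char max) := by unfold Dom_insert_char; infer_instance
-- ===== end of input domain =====

-- B replaces A's per-character counter-and-branch loop by a clamped split point:
-- join char after each character of the k-prefix, then concatenate the untouched suffix (alternative decomposition, same cost).


-- ===== PORT A =====
-- the for-loop over indices 0..len-1 reading string[i] is ported as a left fold
-- over the characters in order; state = (s, count); str(char) = char (a string).
def insert_char (string : String) (char : String) (max : Int) : String :=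
  let res := string.toList.foldl
    (fun (st : List Char × Int) c =>
      if st.2 < max then (st.1 ++ (c :: char.toList), st.2 + 1)
      else (st.1 ++ [c], st.2)) ([], 0)
  String.ofList res.1

-- ===== PORT B =====
-- k clamped to [0, len]; string[:k]/string[k:] with 0 ≤ k ≤ len are take/drop;
-- the join over the prefix is a flatMap.
def insert_char_alt (string : String) (char : String) (max : Int) : String :=
  let l := string.toList
  let k : Nat := if max < 0 then 0 else (if max > (l.length : Int) then l.length else max.toNat)
  String.ofList ((l.take k).flatMap (fun c => c :: char.toList) ++ l.drop k)

-- ===== PRECONDITION & SPEC =====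
def Spec_insert_char (string : String) (char : String) (max : Int) (out : String) : Prop := out = insert_char_alt string char max
instance (string : String) (char : String) (max : Int) (out : String) : Decidable (Spec_insert_char string char max out) := by unfold Spec_insert_char; infer_instance

-- ===== CLAIM (what is proved, stated in full; the proofs are below) =====
def Claim_equal_insert_char : Prop := ∀ (string : String) (char : String) (max : Int), Dom_insert_char string char max → Spec_insert_char string char max (insert_char string char max)

-- ===== LEMMAS AND PROOFS =====

-- loop invariant: A's fold splits the remaining list at min |l| (max - count)⁺
lemma insert_loop_eq (char : List Char) (max : Int) :
    ∀ (l : List Char) (s : List Char) (c : Int),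
      (l.foldl (fun (st : List Char × Int) x =>
          if st.2 < max then (st.1 ++ (x :: char), st.2 + 1)
          else (st.1 ++ [x], st.2)) (s, c)).1
        = s ++ (l.take (min l.length (max - c).toNat)).flatMap (fun x => x :: char)
            ++ l.drop (min l.length (max - c).toNat) := by
  intro l
  induction l with
  | nil => intro s c; simp
  | cons x xs ih =>
    intro s c
    by_cases h : c < max
    · have h1 : (max - c).toNat = (max - (c + 1)).toNat + 1 := by omega
      have h2 : min (xs.length + 1) ((max - (c + 1)).toNat + 1)
          = min xs.length (max - (c + 1)).toNat + 1 := by omega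
      simp only [List.foldl_cons, if_pos h]
      rw [ih (s ++ (x :: char)) (c + 1)]
      simp [h1, h2, List.flatMap_cons]
    · have h0 : (max - c).toNat = 0 := by omega
      simp only [List.foldl_cons, if_neg h]
      rw [ih (s ++ [x]) c]
      simp [h0]

-- ===== VERDICT (by name: the statement is the Claim_ definition above) =====
theorem insert_char_spec : Claim_equal_insert_char := by
  intro string char max _
  show insert_char string char max = insert_char_alt string char max
  simp only [insert_char, insert_char_alt]
  rw [insert_loop_eq char.toList max string.toList [] 0]
  have hk : min string.length max.toNat
      = (if max < 0 then 0 else if (string.length : Int) < max then string.length else max.toNat) := by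
    split_ifs <;> omega
  simp [hk]
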